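-- pv_equiv track=rewrite | github.com/Lancert9/WUA | stage2_models/RecordFeatureFunc.py | __value_encode
-- ===== SOURCE A (Python) =====
-- def __value_encode(value):
--     """
--     combine the successive numerical sequence.
--     :param value: str -> value
--     :return: str -> value_code
--     """
--     value_code = []
--     number_flag = False
--     for char in value:
--         if char.isdigit():
--             if not number_flag:
--                 number_flag = True
--                 value_code.append('<D>')
--         else:
--             number_flag = False
--             value_code.append(char)
--     return ''.join(value_code)
-- ===== SOURCE B (Python) =====
-- def __value_encode(value):
--     """
--     combine the successive numerical sequence.
--     :param value: str -> value
--     :return: str -> value_code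
--     """
--     out = []
--     i, n = 0, len(value)
--     while i < n:
--         if value[i].isdigit():
--             j = i + 1
--             while j < n and value[j].isdigit():
--                 j += 1
--             out.append('<D>')
--             i = j
--         else:
--             out.append(value[i])
--             i += 1
--     return ''.join(out)
-- ===== Notes on version B (the rewrite author's own statement) =====
-- stated objective: alternative
-- what changed: Replaces the per-character boolean number_flag state machine with a run-based two-pointer scan that consumes each maximal digit run at once and copies non-digit characters directly.
import Mathlib
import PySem

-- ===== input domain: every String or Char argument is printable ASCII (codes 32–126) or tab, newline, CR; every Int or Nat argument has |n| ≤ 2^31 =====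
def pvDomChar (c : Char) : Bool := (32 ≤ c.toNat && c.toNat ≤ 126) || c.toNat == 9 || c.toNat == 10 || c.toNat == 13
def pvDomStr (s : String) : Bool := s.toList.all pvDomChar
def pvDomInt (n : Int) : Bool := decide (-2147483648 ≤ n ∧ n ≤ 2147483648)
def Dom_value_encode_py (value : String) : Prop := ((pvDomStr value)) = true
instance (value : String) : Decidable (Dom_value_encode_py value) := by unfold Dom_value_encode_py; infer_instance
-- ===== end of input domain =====

-- B replaces A's per-character number_flag state machine by a run-based scan that consumes
-- each maximal digit run at once (alternative decomposition, same O(n) cost).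

-- ===== PORT A =====
-- A's loop body: state is (value_code, number_flag)
def valueEncodeStepA (st : List String × Bool) (c : Char) : List String × Bool :=
  if PySem.Chars.isdigit c then
    if !st.2 then (st.1 ++ ["<D>"], true) else (st.1, true)
  else (st.1 ++ [String.ofList [c]], false)

-- A: fold the loop body over the characters starting from ([], False), then ''.join
def value_encode_py (value : String) : String :=
  String.join (value.toList.foldl valueEncodeStepA ([], false)).1

-- ===== PORT B =====
-- B: recursion over digit runs; a digit starts a run, the rest of the run is dropped at once
def valueEncodeAltGo : List Char → List Char
  | [] => []
  | c :: rest =>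
    if PySem.Chars.isdigit c then
      '<' :: 'D' :: '>' :: valueEncodeAltGo (rest.dropWhile PySem.Chars.isdigit)
    else c :: valueEncodeAltGo rest
termination_by l => l.length
decreasing_by
  · exact Nat.lt_succ_of_le (List.length_dropWhile_le _ _)
  · simp

def value_encode_py_alt (value : String) : String :=
  String.ofList (valueEncodeAltGo value.toList)

-- ===== PRECONDITION & SPEC =====
def Spec_value_encode_py (value : String) (out : String) : Prop := out = value_encode_py_alt value
instance (value : String) (out : String) : Decidable (Spec_value_encode_py value out) := by unfold Spec_value_encode_py; infer_instance

-- ===== CLAIM (what is proved, stated in full; the proofs are below) =====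
def Claim_equal_value_encode_py : Prop := ∀ (value : String), Dom_value_encode_py value → Spec_value_encode_py value (value_encode_py value)

-- ===== LEMMAS AND PROOFS =====

-- characterisation of A's fold: the list of pieces it produces, as a function of the flag
def specA : List Char → Bool → List String
  | [], _ => []
  | c :: rest, flag =>
    if PySem.Chars.isdigit c then
      if flag then specA rest true else "<D>" :: specA rest true
    else String.ofList [c] :: specA rest false

theorem foldl_specA (l : List Char) (acc : List String) (flag : Bool) :
    (List.foldl valueEncodeStepA (acc, flag) l).1 = acc ++ specA l flag := by
  induction l generalizing acc flag with
  | nil => simp [specA]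
  | cons c rest ih =>
    rw [List.foldl_cons]
    by_cases h : PySem.Chars.isdigit c = true
    · cases flag with
      | false =>
        rw [show valueEncodeStepA (acc, false) c = (acc ++ ["<D>"], true) from by
              simp [valueEncodeStepA, h], ih]
        simp [specA, h]
      | true =>
        rw [show valueEncodeStepA (acc, true) c = (acc, true) from by
              simp [valueEncodeStepA, h], ih]
        simp [specA, h]
    · rw [show valueEncodeStepA (acc, flag) c = (acc ++ [String.ofList [c]], false) from by
            simp [valueEncodeStepA, h], ih]
      simp [specA, h]

theorem specA_flatten (l : List Char) :
    ∀ flag, ((specA l flag).map String.toList).flatten =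
      valueEncodeAltGo (if flag then l.dropWhile PySem.Chars.isdigit else l) := by
  induction l with
  | nil => intro flag; cases flag <;> simp [specA, valueEncodeAltGo]
  | cons c rest ih =>
    intro flag
    by_cases h : PySem.Chars.isdigit c = true
    · cases flag
      · simp [specA, h, valueEncodeAltGo, ih true]
      · simp [specA, h, ih true]
    · cases flag <;>
        simp [specA, h, valueEncodeAltGo, ih false]

theorem join_foldl_ofList (L : List String) (acc : String) :
    List.foldl (fun r s => r ++ s) acc L = acc ++ String.ofList ((L.map String.toList).flatten) := by
  induction L generalizing acc with
  | nil => simp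
  | cons s rest ih =>
    rw [List.foldl_cons, ih, String.append_assoc]
    simp

theorem join_eq_ofList (L : List String) :
    String.join L = String.ofList ((L.map String.toList).flatten) := by
  show List.foldl (fun r s => r ++ s) "" L = _
  rw [join_foldl_ofList]
  simp

-- ===== VERDICT (by name: the statement is the Claim_ definition above) =====
theorem value_encode_py_spec : Claim_equal_value_encode_py := by
  intro value _
  unfold Spec_value_encode_py value_encode_py value_encode_py_alt
  rw [foldl_specA, List.nil_append, join_eq_ofList, specA_flatten]
  simp
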